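-- pv_equiv track=rewrite | github.com/EldHD/fantasy-lineup-bot | bot/external/transfermarkt.py | _map_main
-- ===== SOURCE A (Python) =====
-- def _map_main(pos: str) -> str:
--     p = pos.lower()
--     if "keeper" in p:
--         return "goalkeeper"
--     if any(k in p for k in ("defender", "back", "centre-back", "center-back", "full-back", "wing-back")):
--         return "defender"
--     if "midfield" in p:
--         return "midfielder"
--     if any(k in p for k in ("attack", "forward", "striker", "winger")):
--         return "forward"
--     # default
--     return "midfielder"
-- ===== SOURCE B (Python) =====
-- _KEYWORDS = (
--     ("keeper", 0),
--     ("defender", 1),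
--     ("back", 1),
--     ("midfield", 2),
--     ("attack", 3),
--     ("forward", 3),
--     ("striker", 3),
--     ("winger", 3),
-- )
-- _ROLES = ("goalkeeper", "defender", "midfielder", "forward", "midfielder")
--
--
-- def _map_main(pos: str) -> str:
--     # Single scan over the positions of the lowered string, keeping the minimum
--     # rule priority whose keyword starts at that position; index 4 = default.
--     # ("centre-back" etc. all contain "back", so "back" alone covers them.)
--     p = pos.lower()
--     best = 4
--     for i in range(len(p)):
--         for k, r in _KEYWORDS:
--             if r < best and p.startswith(k, i):
--                 best = r
--     return _ROLES[best]
-- ===== Notes on version B (the rewrite author's own statement) =====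
-- stated objective: alternative
-- what changed: Instead of A's ordered if-chain of substring-membership tests, B makes one scan over the positions of the lowered string, keeping the minimum rule priority whose keyword starts at that position (redundant keywords like 'centre-back' dropped since they contain 'back'), then indexes a role table by that minimum.
import Mathlib
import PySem

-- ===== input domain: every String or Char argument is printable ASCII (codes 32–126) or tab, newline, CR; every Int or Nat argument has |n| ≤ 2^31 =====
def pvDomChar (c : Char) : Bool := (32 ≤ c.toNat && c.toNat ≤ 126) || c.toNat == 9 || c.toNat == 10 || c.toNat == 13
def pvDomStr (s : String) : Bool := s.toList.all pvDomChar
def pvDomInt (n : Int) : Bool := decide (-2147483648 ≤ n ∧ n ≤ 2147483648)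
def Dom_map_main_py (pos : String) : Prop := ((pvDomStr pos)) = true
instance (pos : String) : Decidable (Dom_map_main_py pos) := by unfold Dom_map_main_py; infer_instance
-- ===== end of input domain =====

-- B replaces A's ordered if-chain of substring tests by a single scan over positions that
-- keeps the minimum matching rule priority and indexes a role table; same behaviour.

-- ===== PORT A =====
def map_main_py (pos : String) : String :=
  let p := PySem.Str.lower pos
  if PySem.Str.isIn "keeper" p then "goalkeeper"
  else if ["defender", "back", "centre-back", "center-back", "full-back", "wing-back"].any
      (fun k => PySem.Str.isIn k p) then "defender"
  else if PySem.Str.isIn "midfield" p then "midfielder"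
  else if ["attack", "forward", "striker", "winger"].any (fun k => PySem.Str.isIn k p) then "forward"
  else "midfielder"

-- ===== PORT B =====
def kwB : List (List Char × Nat) :=
  [("keeper".toList, 0), ("defender".toList, 1), ("back".toList, 1), ("midfield".toList, 2),
   ("attack".toList, 3), ("forward".toList, 3), ("striker".toList, 3), ("winger".toList, 3)]

def rolesB : List String := ["goalkeeper", "defender", "midfielder", "forward", "midfielder"]

-- the inner `for k, r in _KEYWORDS` loop of Source B
def innerB (p : List Char) (b : Nat) : Nat :=
  kwB.foldl (fun b kr => if decide (kr.2 < b) && PySem.Chars.startswith p kr.1 then kr.2 else b) b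

-- the `for i in range(len(p))` loop of Source B; p.startswith(k, i) tests the prefix of p.drop i
def map_main_py_alt (pos : String) : String :=
  let p := (PySem.Str.lower pos).toList
  rolesB.getD ((List.range p.length).foldl (fun b i => innerB (p.drop i) b) 4) ""

-- ===== PRECONDITION & SPEC =====
def Spec_map_main_py (pos : String) (out : String) : Prop := out = map_main_py_alt pos
instance (pos : String) (out : String) : Decidable (Spec_map_main_py pos out) := by unfold Spec_map_main_py; infer_instance

-- ===== CLAIM =====
def Claim_equal_map_main_py : Prop := ∀ (pos : String), Dom_map_main_py pos → Spec_map_main_py pos (map_main_py pos)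

-- ===== LEMMAS AND PROOFS =====

-- priority chain: index of the first true group, 4 = none
def chain4 (a b c d : Bool) : Nat := if a then 0 else if b then 1 else if c then 2 else if d then 3 else 4

-- group matches by substring containment (over the reduced keyword set)
def mIdx (s : List Char) : Nat :=
  chain4 (PySem.Chars.isIn "keeper".toList s)
    (PySem.Chars.isIn "defender".toList s || PySem.Chars.isIn "back".toList s)
    (PySem.Chars.isIn "midfield".toList s)
    (PySem.Chars.isIn "attack".toList s || PySem.Chars.isIn "forward".toList s ||
     PySem.Chars.isIn "striker".toList s || PySem.Chars.isIn "winger".toList s)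

-- group matches by prefix at the current suffix
def pIdx (s : List Char) : Nat :=
  chain4 (PySem.Chars.startswith s "keeper".toList)
    (PySem.Chars.startswith s "defender".toList || PySem.Chars.startswith s "back".toList)
    (PySem.Chars.startswith s "midfield".toList)
    (PySem.Chars.startswith s "attack".toList || PySem.Chars.startswith s "forward".toList ||
     PySem.Chars.startswith s "striker".toList || PySem.Chars.startswith s "winger".toList)

theorem chain4_le (a b c d : Bool) : chain4 a b c d ≤ 4 := by
  cases a <;> cases b <;> cases c <;> cases d <;> decide

theorem chain4_min (a b c d a' b' c' d' : Bool) :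
    chain4 (a || a') (b || b') (c || c') (d || d') =
      min (chain4 a b c d) (chain4 a' b' c' d') := by
  revert a b c d a' b' c' d'; decide

-- one step of the inner loop, rephrased as a guarded min
theorem step_min (b r : Nat) (c : Bool) :
    (if decide (r < b) && c then r else b) = if c then min r b else b := by
  cases c
  · simp
  · simp only [Bool.and_true, decide_eq_true_eq, if_true]
    rw [Nat.min_def]
    split_ifs <;> omega

theorem innerB_eq (p : List Char) (b : Nat) (hb : b ≤ 4) : innerB p b = min b (pIdx p) := by
  unfold innerB kwB pIdx chain4
  simp only [List.foldl, step_min]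
  generalize PySem.Chars.startswith p "keeper".toList = c1
  generalize PySem.Chars.startswith p "defender".toList = c2
  generalize PySem.Chars.startswith p "back".toList = c3
  generalize PySem.Chars.startswith p "midfield".toList = c4
  generalize PySem.Chars.startswith p "attack".toList = c5
  generalize PySem.Chars.startswith p "forward".toList = c6
  generalize PySem.Chars.startswith p "striker".toList = c7
  generalize PySem.Chars.startswith p "winger".toList = c8
  interval_cases b <;> revert c1 c2 c3 c4 c5 c6 c7 c8 <;> decide

theorem isIn_cons (sub : List Char) (c : Char) (s : List Char) :
    PySem.Chars.isIn sub (c :: s) =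
      (PySem.Chars.startswith (c :: s) sub || PySem.Chars.isIn sub s) := by
  rw [Bool.eq_iff_iff]
  simp [PySem.Chars.isIn_iff_infix, PySem.Chars.startswith_iff, List.infix_cons_iff]

theorem or2_swap (a1 a2 b1 b2 : Bool) : ((a1 || a2) || (b1 || b2)) = ((a1 || b1) || (a2 || b2)) := by
  revert a1 a2 b1 b2; decide

theorem or4_swap (a1 a2 b1 b2 c1 c2 d1 d2 : Bool) :
    ((a1 || a2) || (b1 || b2) || (c1 || c2) || (d1 || d2)) =
      ((a1 || b1 || c1 || d1) || (a2 || b2 || c2 || d2)) := by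
  revert a1 a2 b1 b2 c1 c2 d1 d2; decide

theorem mIdx_cons (c : Char) (s : List Char) :
    mIdx (c :: s) = min (pIdx (c :: s)) (mIdx s) := by
  unfold mIdx pIdx
  rw [isIn_cons, isIn_cons, isIn_cons, isIn_cons, isIn_cons, isIn_cons, isIn_cons, isIn_cons]
  set A1 := PySem.Chars.startswith (c :: s) "keeper".toList with hA1
  set A2 := PySem.Chars.startswith (c :: s) "defender".toList with hA2
  set A3 := PySem.Chars.startswith (c :: s) "back".toList with hA3
  set A4 := PySem.Chars.startswith (c :: s) "midfield".toList with hA4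
  set A5 := PySem.Chars.startswith (c :: s) "attack".toList with hA5
  set A6 := PySem.Chars.startswith (c :: s) "forward".toList with hA6
  set A7 := PySem.Chars.startswith (c :: s) "striker".toList with hA7
  set A8 := PySem.Chars.startswith (c :: s) "winger".toList with hA8
  set B1 := PySem.Chars.isIn "keeper".toList s with hB1
  set B2 := PySem.Chars.isIn "defender".toList s with hB2
  set B3 := PySem.Chars.isIn "back".toList s with hB3
  set B4 := PySem.Chars.isIn "midfield".toList s with hB4
  set B5 := PySem.Chars.isIn "attack".toList s with hB5
  set B6 := PySem.Chars.isIn "forward".toList s with hB6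
  set B7 := PySem.Chars.isIn "striker".toList s with hB7
  set B8 := PySem.Chars.isIn "winger".toList s with hB8
  rw [or2_swap A2 B2 A3 B3, or4_swap A5 B5 A6 B6 A7 B7 A8 B8]
  exact chain4_min A1 (A2 || A3) A4 (A5 || A6 || A7 || A8) B1 (B2 || B3) B4 (B5 || B6 || B7 || B8)

-- suffix-recursion view of B's index loop (proof helper)
def goAux : List Char → Nat → Nat
  | [], b => b
  | c :: s, b => goAux s (innerB (c :: s) b)

theorem fold_eq_goAux (s : List Char) : ∀ b,
    (List.range s.length).foldl (fun b i => innerB (s.drop i) b) b = goAux s b := by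
  induction s with
  | nil => intro b; rfl
  | cons c s ih =>
      intro b
      rw [List.length_cons, List.range_succ_eq_map, List.foldl_cons, List.foldl_map]
      simp only [List.drop_zero, List.drop_succ_cons]
      exact ih _

theorem goAux_eq (s : List Char) : ∀ b, b ≤ 4 → goAux s b = min b (mIdx s) := by
  induction s with
  | nil =>
      intro b hb
      have h : mIdx [] = 4 := by decide
      simp [goAux, h]; omega
  | cons c s ih =>
      intro b hb
      rw [show goAux (c :: s) b = goAux s (innerB (c :: s) b) from rfl]
      rw [innerB_eq _ _ hb, ih _ (le_trans (Nat.min_le_left _ _) hb), mIdx_cons]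
      omega

-- "back" is contained in every back-variant keyword, so those variants imply the "back" test
theorem variant_back (v : List Char) (hv : "back".toList <:+: v) (p : List Char)
    (h : PySem.Chars.isIn v p = true) : PySem.Chars.isIn "back".toList p = true := by
  rw [PySem.Chars.isIn_iff_infix] at h ⊢
  exact hv.trans h

-- A's if-chain over bools equals indexing the role table by the priority chain
theorem absHelp (xk xd xb xcb xce xfb xwb xm xa xf xst xw : Bool)
    (h1 : xcb = true → xb = true) (h2 : xce = true → xb = true)
    (h3 : xfb = true → xb = true) (h4 : xwb = true → xb = true) :
    (if xk then "goalkeeper"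
     else if (xd || (xb || (xcb || (xce || (xfb || xwb))))) then "defender"
     else if xm then "midfielder"
     else if (xa || (xf || (xst || xw))) then "forward"
     else "midfielder")
    = rolesB.getD (chain4 xk (xd || xb) xm (xa || xf || xst || xw)) "" := by
  revert xk xd xb xcb xce xfb xwb xm xa xf xst xw
  decide

theorem mIdx_le (s : List Char) : mIdx s ≤ 4 := by
  unfold mIdx; exact chain4_le _ _ _ _

-- ===== VERDICT =====
set_option maxHeartbeats 1000000 in
theorem map_main_py_spec : Claim_equal_map_main_py := by
  intro pos _
  unfold Spec_map_main_py map_main_py map_main_py_alt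
  dsimp only
  have hgo : (List.range (PySem.Str.lower pos).toList.length).foldl
      (fun b i => innerB ((PySem.Str.lower pos).toList.drop i) b) 4
      = mIdx (PySem.Str.lower pos).toList := by
    rw [fold_eq_goAux, goAux_eq _ 4 (le_refl 4)]
    have := mIdx_le (PySem.Str.lower pos).toList
    omega
  rw [hgo]
  have hcb := variant_back "centre-back".toList (by decide) (PySem.Str.lower pos).toList
  have hce := variant_back "center-back".toList (by decide) (PySem.Str.lower pos).toList
  have hfb := variant_back "full-back".toList (by decide) (PySem.Str.lower pos).toList
  have hwb := variant_back "wing-back".toList (by decide) (PySem.Str.lower pos).toList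
  unfold mIdx
  simp only [PySem.Str.isIn_eq, List.any_cons, List.any_nil, Bool.or_false]
  exact absHelp _ _ _ _ _ _ _ _ _ _ _ _ hcb hce hfb hwb
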